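-- pv_equiv track=rewrite | github.com/devMingu/codeTest | 프로그래머스/성격 유형 검사하기.py | solution
-- ===== SOURCE A (Python) =====
-- def survey_score(choice):
--     return choice - 4 if choice >= 4 else 4 - choice
--
-- def solution(survey, choices):
--     answer = ''
--     type_index = ["RT", "CF", "JM", "AN"]
--     idx = 0
--     char_type = {}
--
--     for el in survey:
--         disagree_el, agree_el = el[0], el[1]
--         choice = choices[idx]
--
--         score = survey_score(choice)
--         if choice >= 5:
--             char_type[agree_el] = score if agree_el not in char_type else char_type[agree_el] + score
--         else:
--             char_type[disagree_el] = score if disagree_el not in char_type else char_type[disagree_el] + score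
--
--         idx += 1
--
--     for el in type_index:
--         t1 = char_type[el[0]] if el[0] in char_type else 0
--         t2 = char_type[el[1]] if el[1] in char_type else 0
--
--         answer += el[0] if t1 >= t2 else el[1]
--
--     return answer
-- ===== SOURCE B (Python) =====
-- # B: no per-character dict -- compute one signed net score per axis directly
-- # from zip(survey, choices); same value as A wherever A returns (see Pre_).
-- AXES = [("R", "T"), ("C", "F"), ("J", "M"), ("A", "N")]
--
-- def solution(survey, choices):
--     out = []
--     for a, b in AXES:
--         net = 0
--         for el, c in zip(survey, choices):
--             m = c - 4 if c >= 4 else 4 - c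
--             ch = el[1] if c >= 5 else el[0]
--             if ch == a:
--                 net += m
--             elif ch == b:
--                 net -= m
--         out.append(a if net >= 0 else b)
--     return ''.join(out)
-- ===== Notes on version B (the rewrite author's own statement) =====
-- stated objective: simpler
-- what changed: B drops A's per-character dict entirely: it transposes the loops and computes one signed net score per axis directly from zip(survey, choices), appending the first axis letter when the net is >= 0.
import Mathlib
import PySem

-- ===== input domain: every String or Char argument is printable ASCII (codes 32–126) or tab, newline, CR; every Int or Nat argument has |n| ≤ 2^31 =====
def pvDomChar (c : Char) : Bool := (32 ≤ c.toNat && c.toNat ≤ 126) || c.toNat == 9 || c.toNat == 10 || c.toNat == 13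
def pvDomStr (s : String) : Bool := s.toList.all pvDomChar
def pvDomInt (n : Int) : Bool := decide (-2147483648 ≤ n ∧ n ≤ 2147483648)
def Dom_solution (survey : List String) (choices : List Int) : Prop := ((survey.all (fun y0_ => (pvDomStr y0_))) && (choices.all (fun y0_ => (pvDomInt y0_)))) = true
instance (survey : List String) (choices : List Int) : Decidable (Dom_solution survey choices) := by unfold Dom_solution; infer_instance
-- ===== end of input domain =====

-- B replaces A's per-character dict by one signed net score per axis computed in a
-- transposed pass over zip(survey, choices); objective: simpler.

-- ===== PORT A =====
def surveyScore (choice : Int) : Int := if choice ≥ 4 then choice - 4 else 4 - choice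

-- first loop of A: builds char_type; idx indexes choices (the .getD defaults are never
-- reached under Pre_solution, which excludes exactly the inputs where Python raises)
def solLoopA : List String → List Int → Int → PySem.Dict Char Int → PySem.Dict Char Int
  | [], _, _, d => d
  | el :: rest, choices, idx, d =>
    let disagree := (PySem.Str.pyGet? el 0).getD ' '
    let agree := (PySem.Str.pyGet? el 1).getD ' '
    let choice := (PySem.List.pyGet? choices idx).getD 0
    let score := surveyScore choice
    let d' :=
      if choice ≥ 5 then
        (if d.contains agree = false then d.insert agree score
         else d.insert agree (d.getD agree 0 + score))
      else
        (if d.contains disagree = false then d.insert disagree score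
         else d.insert disagree (d.getD disagree 0 + score))
    solLoopA rest choices (idx + 1) d'

-- second loop of A: picks the dominant character per axis
def solOutA (d : PySem.Dict Char Int) : String :=
  ["RT", "CF", "JM", "AN"].foldl (fun answer el =>
    let e0 := (PySem.Str.pyGet? el 0).getD ' '
    let e1 := (PySem.Str.pyGet? el 1).getD ' '
    let t1 := if d.contains e0 then d.getD e0 0 else 0
    let t2 := if d.contains e1 then d.getD e1 0 else 0
    answer ++ (if t1 ≥ t2 then String.ofList [e0] else String.ofList [e1])) ""

def solution (survey : List String) (choices : List Int) : String :=
  solOutA (solLoopA survey choices 0 PySem.Dict.empty)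

-- ===== PORT B =====
-- B's inner loop: the net score of the axis (a, b) over the zipped responses
def netLoopB (ps : List (String × Int)) (a b : Char) : Int :=
  ps.foldl (fun net p =>
    let m := if p.2 ≥ 4 then p.2 - 4 else 4 - p.2
    let ch := if p.2 ≥ 5 then (PySem.Str.pyGet? p.1 1).getD ' '
              else (PySem.Str.pyGet? p.1 0).getD ' '
    if ch = a then net + m else if ch = b then net - m else net) (0 : Int)

def solution_alt (survey : List String) (choices : List Int) : String :=
  let ps := survey.zip choices
  let axes : List (Char × Char) := [('R', 'T'), ('C', 'F'), ('J', 'M'), ('A', 'N')]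
  String.ofList (axes.foldl (fun (out : List Char) ab =>
    out ++ [if netLoopB ps ab.1 ab.2 ≥ 0 then ab.1 else ab.2]) [])

-- ===== PRECONDITION & SPEC =====
-- Pre_ excludes exactly the inputs on which Python A raises an IndexError:
-- a survey entry shorter than 2 characters, or fewer choices than survey entries.
def Pre_solution (survey : List String) (choices : List Int) : Prop :=
  survey.length ≤ choices.length ∧ ∀ s ∈ survey, 2 ≤ s.length

instance (survey : List String) (choices : List Int) : Decidable (Pre_solution survey choices) := by
  unfold Pre_solution; infer_instance

def pvWitness_solution : List String × List Int := (["RT", "AN"], [7, 2])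

def Spec_solution (survey : List String) (choices : List Int) (out : String) : Prop :=
  out = solution_alt survey choices
instance (survey : List String) (choices : List Int) (out : String) : Decidable (Spec_solution survey choices out) := by unfold Spec_solution; infer_instance

-- ===== CLAIM (what is proved, stated in full; the proofs are below) =====
def Claim_equal_solution : Prop := ∀ (survey : List String) (choices : List Int), Dom_solution survey choices → Pre_solution survey choices → Spec_solution survey choices (solution survey choices)

-- ===== LEMMAS AND PROOFS =====

-- the character a response credits, and the magnitude it adds
def pvKey (p : String × Int) : Char :=
  if p.2 ≥ 5 then (PySem.Str.pyGet? p.1 1).getD ' ' else (PySem.Str.pyGet? p.1 0).getD ' '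
def pvMag (p : String × Int) : Int := surveyScore p.2

-- total score credited to character c by the responses ps
def pvS (ps : List (String × Int)) (c : Char) : Int :=
  (ps.map (fun p => if pvKey p = c then pvMag p else 0)).sum

theorem pvS_cons (p : String × Int) (ps : List (String × Int)) (c : Char) :
    pvS (p :: ps) c = (if pvKey p = c then pvMag p else 0) + pvS ps c := by
  simp [pvS]

-- A's loop is the fold of a single canonical dict update over the zipped responses
theorem solLoopA_zip (survey : List String) (choices : List Int) :
    ∀ (n : Nat) (d : PySem.Dict Char Int), n + survey.length ≤ choices.length →
      solLoopA survey choices (n : Int) d =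
        (survey.zip (choices.drop n)).foldl
          (fun d p => d.insert (pvKey p) (d.getD (pvKey p) 0 + pvMag p)) d := by
  induction survey with
  | nil => intro n d _; simp [solLoopA]
  | cons el rest ih =>
    intro n d hlen
    have hn : n < choices.length := by simp at hlen; omega
    have hget : PySem.List.pyGet? choices (n : Int) = some choices[n] := by
      simp [PySem.List.pyGet?_natCast, List.getElem?_eq_getElem hn]
    have hdrop : choices.drop n = choices[n] :: choices.drop (n + 1) :=
      List.drop_eq_getElem_cons hn
    have hstep : ∀ (d0 : PySem.Dict Char Int) (k : Char) (s : Int),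
        (if d0.contains k = false then d0.insert k s else d0.insert k (d0.getD k 0 + s))
          = d0.insert k (d0.getD k 0 + s) := by
      intro d0 k s
      by_cases h : d0.contains k
      · simp [h]
      · have h' : d0.contains k = false := by simpa using h
        rw [h', PySem.Dict.getD_of_not_contains d0 0 h', zero_add]
        apply ite_self
    simp only [solLoopA, hget, hdrop, List.zip_cons_cons, List.foldl_cons, Option.getD_some]
    rw [hstep, hstep]
    by_cases hc : choices[n] ≥ 5
    · rw [if_pos hc, show ((n : Int) + 1) = ((n + 1 : Nat) : Int) by push_cast; ring,
          ih (n + 1) _ (by simp at hlen ⊢; omega)]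
      simp [pvKey, pvMag, surveyScore, hc]
    · rw [if_neg hc, show ((n : Int) + 1) = ((n + 1 : Nat) : Int) by push_cast; ring,
          ih (n + 1) _ (by simp at hlen ⊢; omega)]
      simp [pvKey, pvMag, surveyScore, hc]

-- the fold's effect on any character's tally
theorem foldl_insert_getD (ps : List (String × Int)) :
    ∀ (d : PySem.Dict Char Int) (c : Char),
      ((ps.foldl (fun d p => d.insert (pvKey p) (d.getD (pvKey p) 0 + pvMag p)) d).getD c 0)
        = d.getD c 0 + pvS ps c := by
  induction ps with
  | nil => intro d c; simp [pvS]
  | cons p ps ih =>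
    intro d c
    rw [List.foldl_cons, ih, pvS_cons, PySem.Dict.getD_insert]
    by_cases h : c = pvKey p
    · simp [h, eq_comm]; ring
    · have h' : ¬ (pvKey p = c) := fun hh => h hh.symm
      simp [h, h']

-- the final dict read never needs the contains guard
theorem contains_guard (d : PySem.Dict Char Int) (c : Char) :
    (if d.contains c then d.getD c 0 else 0) = d.getD c 0 := by
  by_cases h : d.contains c
  · simp [h]
  · have h' : d.contains c = false := by simpa using h
    rw [h', PySem.Dict.getD_of_not_contains d 0 h']
    apply ite_self

-- B's inner fold computes the difference of the two characters' tallies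
theorem netLoopB_aux (a b : Char) (hab : a ≠ b) (ps : List (String × Int)) :
    ∀ (n : Int),
      (ps.foldl (fun net p =>
        let m := if p.2 ≥ 4 then p.2 - 4 else 4 - p.2
        let ch := if p.2 ≥ 5 then (PySem.Str.pyGet? p.1 1).getD ' '
                  else (PySem.Str.pyGet? p.1 0).getD ' '
        if ch = a then net + m else if ch = b then net - m else net) n)
        = n + (pvS ps a - pvS ps b) := by
  induction ps with
  | nil => intro n; simp [pvS]
  | cons p ps ih =>
    intro n
    rw [List.foldl_cons, pvS_cons, pvS_cons]
    have hm : (if p.2 ≥ 4 then p.2 - 4 else 4 - p.2) = pvMag p := rfl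
    have hch : (if p.2 ≥ 5 then (PySem.Str.pyGet? p.1 1).getD ' '
                else (PySem.Str.pyGet? p.1 0).getD ' ') = pvKey p := rfl
    simp only [hm, hch]
    by_cases ha : pvKey p = a
    · subst ha
      simp only [if_true, if_neg hab, ih]; ring
    · by_cases hb : pvKey p = b
      · subst hb
        simp only [if_true, if_neg ha, ih]; ring
      · simp only [if_neg ha, if_neg hb, ih]; ring

theorem netLoopB_eq (ps : List (String × Int)) (a b : Char) (hab : a ≠ b) :
    netLoopB ps a b = pvS ps a - pvS ps b := by
  rw [netLoopB, netLoopB_aux a b hab ps 0, zero_add]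

-- ===== VERDICT (by name: the statement is the Claim_ definition above) =====
theorem solution_spec : Claim_equal_solution := by
  intro survey choices _ hpre
  obtain ⟨hlen, _⟩ := hpre
  unfold Spec_solution solution solution_alt
  have h0 := solLoopA_zip survey choices 0 PySem.Dict.empty (by omega)
  norm_num at h0
  rw [h0]
  set ps := survey.zip choices with hps
  have hgetD : ∀ c, ((ps.foldl
      (fun d p => d.insert (pvKey p) (d.getD (pvKey p) 0 + pvMag p)) PySem.Dict.empty).getD c 0)
      = pvS ps c := by
    intro c; rw [foldl_insert_getD]; simp
  unfold solOutA
  simp only [List.foldl_cons, List.foldl_nil]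
  have e1 : (PySem.Str.pyGet? "RT" 0).getD ' ' = 'R' := by decide
  have e2 : (PySem.Str.pyGet? "RT" 1).getD ' ' = 'T' := by decide
  have e3 : (PySem.Str.pyGet? "CF" 0).getD ' ' = 'C' := by decide
  have e4 : (PySem.Str.pyGet? "CF" 1).getD ' ' = 'F' := by decide
  have e5 : (PySem.Str.pyGet? "JM" 0).getD ' ' = 'J' := by decide
  have e6 : (PySem.Str.pyGet? "JM" 1).getD ' ' = 'M' := by decide
  have e7 : (PySem.Str.pyGet? "AN" 0).getD ' ' = 'A' := by decide
  have e8 : (PySem.Str.pyGet? "AN" 1).getD ' ' = 'N' := by decide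
  simp only [e1, e2, e3, e4, e5, e6, e7, e8]
  simp only [contains_guard]
  simp only [hgetD]
  simp only [netLoopB_eq ps 'R' 'T' (by decide), netLoopB_eq ps 'C' 'F' (by decide),
    netLoopB_eq ps 'J' 'M' (by decide), netLoopB_eq ps 'A' 'N' (by decide)]
  simp only [ge_iff_le, sub_nonneg, List.nil_append, List.cons_append]
  have hfin : ∀ (p q r s : Prop) (ip : Decidable p) (iq : Decidable q) (ir : Decidable r)
      (is_ : Decidable s),
      ((("" ++ (if p then String.ofList ['R'] else String.ofList ['T']))
          ++ (if q then String.ofList ['C'] else String.ofList ['F']))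
          ++ (if r then String.ofList ['J'] else String.ofList ['M']))
          ++ (if s then String.ofList ['A'] else String.ofList ['N'])
        = String.ofList [if p then 'R' else 'T', if q then 'C' else 'F',
            if r then 'J' else 'M', if s then 'A' else 'N'] := by
    intro p q r s ip iq ir is_
    split_ifs <;> rfl
  exact hfin _ _ _ _ _ _ _ _
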